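-- pv_equiv track=rewrite | github.com/QUSETIONS/MiniCode-Python | minicode/permissions.py | _classify_dangerous_command
-- ===== SOURCE A (Python) =====
-- def _format_command_signature(command: str, args: list[str]) -> str:
--     return " ".join([command, *args]).strip()
--
-- def _classify_dangerous_command(command: str, args: list[str]) -> str | None:
--     normalized_args = [arg.strip() for arg in args if arg.strip()]
--     signature = _format_command_signature(command, normalized_args)
--
--     if command == "git":
--         if "reset" in normalized_args and "--hard" in normalized_args:
--             return f"git reset --hard can discard local changes ({signature})"
--         if "clean" in normalized_args:
--             return f"git clean can delete untracked files ({signature})"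
--         if "checkout" in normalized_args and "--" in normalized_args:
--             return f"git checkout -- can overwrite working tree files ({signature})"
--         if "push" in normalized_args and any(arg in {"--force", "-f"} for arg in normalized_args):
--             return f"git push --force rewrites remote history ({signature})"
--         if "restore" in normalized_args and any(arg.startswith("--source") for arg in normalized_args):
--             return f"git restore --source can overwrite local files ({signature})"
--
--     if command == "npm" and "publish" in normalized_args:
--         return f"npm publish affects a registry outside this machine ({signature})"
--
--     # 灾难性删除命令检测
--     if command == "rm":
--         # 组合所有标志（支持 -rf, -fr, -Rf, -r -f 等）
--         combined_flags = "".join(arg for arg in normalized_args if arg.startswith("-")).lower()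
--         # 检查是否同时有递归和强制标志
--         if "r" in combined_flags and "f" in combined_flags:
--             # 检查是否针对根目录或使用 --no-preserve-root
--             if any(arg in {"/", "/*"} for arg in normalized_args) or "--no-preserve-root" in normalized_args:
--                 return f"rm -rf can cause catastrophic data loss ({signature})"
--             # 即使不是根目录，rm -rf 也是危险的
--             return f"rm -rf can cause catastrophic data loss ({signature})"
--
--     # 磁盘写入/格式化命令检测
--     if command in {"dd", "mkfs", "mkfs.ext4", "mkfs.vfat", "fdisk", "format"}:
--         return f"{command} can modify or destroy disk partitions ({signature})"
--
--     # 权限全开命令检测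
--     if command == "chmod":
--         if "777" in normalized_args or any(arg.endswith("777") for arg in normalized_args):
--             return f"chmod 777 opens permissions to all users ({signature})"
--
--     if command in {
--         "node", "python", "python3", "pythonw",
--         "bun", "bash", "sh", "zsh", "fish",
--         "powershell", "pwsh",
--     }:
--         return f"{command} can execute arbitrary local code ({signature})"
--
--     # macOS-specific dangerous commands
--     if command == "diskutil":
--         return f"diskutil can erase or partition disks ({signature})"
--     if command == "csrutil":
--         return f"csrutil modifies System Integrity Protection ({signature})"
--     if command == "defaults" and "write" in normalized_args:
--         return f"defaults write modifies system preferences ({signature})"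
--     if command == "launchctl" and any(arg in {"unload", "bootout", "disable"} for arg in normalized_args):
--         return f"launchctl can disable system services ({signature})"
--     if command == "dscl":
--         return f"dscl can modify directory services and user accounts ({signature})"
--
--     return None
-- ===== SOURCE B (Python) =====
-- # B: data-driven rule engine — all checks become one ordered rule table
-- # (command set, conjunction of argument atoms, message data) evaluated by
-- # a single generic interpreter, replacing A's hard-coded if-chain.
--
-- _RULES = [
--     (("git",), (("has", "reset"), ("has", "--hard")), False,
--      "git reset --hard can discard local changes"),
--     (("git",), (("has", "clean"),), False,
--      "git clean can delete untracked files"),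
--     (("git",), (("has", "checkout"), ("has", "--")), False,
--      "git checkout -- can overwrite working tree files"),
--     (("git",), (("has", "push"), ("anyin", ("--force", "-f"))), False,
--      "git push --force rewrites remote history"),
--     (("git",), (("has", "restore"), ("prefix", "--source")), False,
--      "git restore --source can overwrite local files"),
--     (("npm",), (("has", "publish"),), False,
--      "npm publish affects a registry outside this machine"),
--     (("rm",), (("flag", "r"), ("flag", "f")), False,
--      "rm -rf can cause catastrophic data loss"),
--     (("dd", "mkfs", "mkfs.ext4", "mkfs.vfat", "fdisk", "format"), (), True,
--      " can modify or destroy disk partitions"),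
--     (("chmod",), (("suffix", "777"),), False,
--      "chmod 777 opens permissions to all users"),
--     (("node", "python", "python3", "pythonw", "bun", "bash", "sh", "zsh",
--       "fish", "powershell", "pwsh"), (), True,
--      " can execute arbitrary local code"),
--     (("diskutil",), (), False, "diskutil can erase or partition disks"),
--     (("csrutil",), (), False, "csrutil modifies System Integrity Protection"),
--     (("defaults",), (("has", "write"),), False,
--      "defaults write modifies system preferences"),
--     (("launchctl",), (("anyin", ("unload", "bootout", "disable")),), False,
--      "launchctl can disable system services"),
--     (("dscl",), (), False, "dscl can modify directory services and user accounts"),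
-- ]
--
--
-- def _atom_holds(atom, normalized_args):
--     kind, val = atom
--     if kind == "has":
--         return val in normalized_args
--     if kind == "anyin":
--         return any(a in val for a in normalized_args)
--     if kind == "prefix":
--         return any(a.startswith(val) for a in normalized_args)
--     if kind == "suffix":
--         return any(a.endswith(val) for a in normalized_args)
--     # kind == "flag": val occurs in the combined lowercased dash-flags
--     flags = "".join(a for a in normalized_args if a.startswith("-")).lower()
--     return val in flags
--
--
-- def _classify_dangerous_command(command, args):
--     normalized_args = [arg.strip() for arg in args if arg.strip()]
--     signature = " ".join([command, *normalized_args]).strip()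
--     for commands, atoms, cmd_prefix, text in _RULES:
--         if command in commands and all(_atom_holds(a, normalized_args) for a in atoms):
--             head = command + text if cmd_prefix else text
--             return f"{head} ({signature})"
--     return None
-- ===== Notes on version B (the rewrite author's own statement) =====
-- stated objective: alternative
-- what changed: Replaced A's hard-coded if-chain with a declarative ordered rule table (command set, conjunction of argument atoms, message data) scanned by one generic interpreter; chmod's two checks collapse into a single suffix atom since '777' ends with '777'.
import Mathlib
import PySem

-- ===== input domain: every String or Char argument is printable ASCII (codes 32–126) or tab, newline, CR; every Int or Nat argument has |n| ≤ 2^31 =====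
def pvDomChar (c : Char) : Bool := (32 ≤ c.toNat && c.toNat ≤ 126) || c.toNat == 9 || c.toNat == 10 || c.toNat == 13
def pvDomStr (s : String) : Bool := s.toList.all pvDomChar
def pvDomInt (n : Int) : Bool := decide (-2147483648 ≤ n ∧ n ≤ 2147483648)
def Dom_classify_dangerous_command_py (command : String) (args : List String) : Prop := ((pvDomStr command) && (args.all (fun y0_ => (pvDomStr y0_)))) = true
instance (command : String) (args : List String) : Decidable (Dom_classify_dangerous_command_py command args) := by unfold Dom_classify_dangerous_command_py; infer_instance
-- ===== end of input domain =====

-- B replaces A's hard-coded if-chain by an ordered declarative rule table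
-- (command set, argument atoms, message data) run by one generic interpreter (objective: alternative).


-- ===== PORT A =====
-- Port of A: the early-return chain is linearized into one if/else-if chain
-- (each `return` guard becomes `command == … && <inner condition>`).
def classify_dangerous_command_py (command : String) (args : List String) : Option String :=
  let na := (args.map PySem.Str.strip).filter (fun s => !(s == ""))
  let sig := PySem.Str.strip (PySem.Str.join " " (command :: na))
  if command == "git" && na.contains "reset" && na.contains "--hard" then
    some ("git reset --hard can discard local changes (" ++ sig ++ ")")
  else if command == "git" && na.contains "clean" then
    some ("git clean can delete untracked files (" ++ sig ++ ")")
  else if command == "git" && na.contains "checkout" && na.contains "--" then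
    some ("git checkout -- can overwrite working tree files (" ++ sig ++ ")")
  else if command == "git" && na.contains "push" && na.any (fun a => a == "--force" || a == "-f") then
    some ("git push --force rewrites remote history (" ++ sig ++ ")")
  else if command == "git" && na.contains "restore" && na.any (fun a => PySem.Str.startswith a "--source") then
    some ("git restore --source can overwrite local files (" ++ sig ++ ")")
  else if command == "npm" && na.contains "publish" then
    some ("npm publish affects a registry outside this machine (" ++ sig ++ ")")
  else if command == "rm" &&
      (let cf := PySem.Str.lower (PySem.Str.join "" (na.filter (fun a => PySem.Str.startswith a "-")));
       PySem.Str.isIn "r" cf && PySem.Str.isIn "f" cf) then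
    -- A's inner root-directory test: both branches return the same message
    if na.any (fun a => a == "/" || a == "/*") || na.contains "--no-preserve-root" then
      some ("rm -rf can cause catastrophic data loss (" ++ sig ++ ")")
    else
      some ("rm -rf can cause catastrophic data loss (" ++ sig ++ ")")
  else if command == "dd" || command == "mkfs" || command == "mkfs.ext4" ||
      command == "mkfs.vfat" || command == "fdisk" || command == "format" then
    some (command ++ " can modify or destroy disk partitions (" ++ sig ++ ")")
  else if command == "chmod" && (na.contains "777" || na.any (fun a => PySem.Str.endswith a "777")) then
    some ("chmod 777 opens permissions to all users (" ++ sig ++ ")")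
  else if command == "node" || command == "python" || command == "python3" || command == "pythonw" ||
      command == "bun" || command == "bash" || command == "sh" || command == "zsh" ||
      command == "fish" || command == "powershell" || command == "pwsh" then
    some (command ++ " can execute arbitrary local code (" ++ sig ++ ")")
  else if command == "diskutil" then
    some ("diskutil can erase or partition disks (" ++ sig ++ ")")
  else if command == "csrutil" then
    some ("csrutil modifies System Integrity Protection (" ++ sig ++ ")")
  else if command == "defaults" && na.contains "write" then
    some ("defaults write modifies system preferences (" ++ sig ++ ")")
  else if command == "launchctl" && na.any (fun a => a == "unload" || a == "bootout" || a == "disable") then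
    some ("launchctl can disable system services (" ++ sig ++ ")")
  else if command == "dscl" then
    some ("dscl can modify directory services and user accounts (" ++ sig ++ ")")
  else
    none

-- ===== PORT B =====
-- B: a rule table (command set, atom conjunction, cmd-prefix flag, text) with one generic evaluator.
inductive PvAtom
  | has : String → PvAtom
  | anyin : List String → PvAtom
  | pre : String → PvAtom
  | suf : String → PvAtom
  | flag : String → PvAtom
deriving DecidableEq, Repr

def pvAtomHolds (na : List String) : PvAtom → Bool
  | .has v => na.contains v
  | .anyin vs => na.any (fun a => vs.contains a)
  | .pre v => na.any (fun a => PySem.Str.startswith a v)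
  | .suf v => na.any (fun a => PySem.Str.endswith a v)
  | .flag v =>
      PySem.Str.isIn v (PySem.Str.lower (PySem.Str.join "" (na.filter (fun a => PySem.Str.startswith a "-"))))

def pvRules : List (List String × List PvAtom × Bool × String) := [
  (["git"], [.has "reset", .has "--hard"], false, "git reset --hard can discard local changes"),
  (["git"], [.has "clean"], false, "git clean can delete untracked files"),
  (["git"], [.has "checkout", .has "--"], false, "git checkout -- can overwrite working tree files"),
  (["git"], [.has "push", .anyin ["--force", "-f"]], false, "git push --force rewrites remote history"),
  (["git"], [.has "restore", .pre "--source"], false, "git restore --source can overwrite local files"),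
  (["npm"], [.has "publish"], false, "npm publish affects a registry outside this machine"),
  (["rm"], [.flag "r", .flag "f"], false, "rm -rf can cause catastrophic data loss"),
  (["dd", "mkfs", "mkfs.ext4", "mkfs.vfat", "fdisk", "format"], [], true, " can modify or destroy disk partitions"),
  (["chmod"], [.suf "777"], false, "chmod 777 opens permissions to all users"),
  (["node", "python", "python3", "pythonw", "bun", "bash", "sh", "zsh", "fish", "powershell", "pwsh"],
     [], true, " can execute arbitrary local code"),
  (["diskutil"], [], false, "diskutil can erase or partition disks"),
  (["csrutil"], [], false, "csrutil modifies System Integrity Protection"),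
  (["defaults"], [.has "write"], false, "defaults write modifies system preferences"),
  (["launchctl"], [.anyin ["unload", "bootout", "disable"]], false, "launchctl can disable system services"),
  (["dscl"], [], false, "dscl can modify directory services and user accounts")]

def classify_dangerous_command_py_alt (command : String) (args : List String) : Option String :=
  let na := (args.map PySem.Str.strip).filter (fun s => !(s == ""))
  let sig := PySem.Str.strip (PySem.Str.join " " (command :: na))
  match pvRules.find? (fun r => r.1.contains command && r.2.1.all (pvAtomHolds na)) with
  | some r => some ((if r.2.2.1 then command ++ r.2.2.2 else r.2.2.2) ++ " (" ++ sig ++ ")")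
  | none => none

-- ===== PRECONDITION & SPEC =====
def Spec_classify_dangerous_command_py (command : String) (args : List String) (out : Option String) : Prop := out = classify_dangerous_command_py_alt command args
instance (command : String) (args : List String) (out : Option String) : Decidable (Spec_classify_dangerous_command_py command args out) := by unfold Spec_classify_dangerous_command_py; infer_instance

-- ===== CLAIM (what is proved, stated in full; the proofs are below) =====
def Claim_equal_classify_dangerous_command_py : Prop := ∀ (command : String) (args : List String), Dom_classify_dangerous_command_py command args → Spec_classify_dangerous_command_py command args (classify_dangerous_command_py command args)

-- ===== LEMMAS AND PROOFS =====
-- an exact "777" argument also ends with "777", so A's disjunction collapses to B's suffix atom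
theorem pv_contains_777_endswith (na : List String) (h : na.contains "777" = true) :
    na.any (fun a => PySem.Str.endswith a "777") = true := by
  simp only [List.contains_iff_mem] at h
  simp only [List.any_eq_true]
  exact ⟨"777", h, by decide⟩

-- the chain/table equality, generalized over the normalized args and the signature
theorem pv_chain_eq_table (command : String) (na : List String) (sig : String) :
    (if command == "git" && na.contains "reset" && na.contains "--hard" then
      some ("git reset --hard can discard local changes (" ++ sig ++ ")")
    else if command == "git" && na.contains "clean" then
      some ("git clean can delete untracked files (" ++ sig ++ ")")
    else if command == "git" && na.contains "checkout" && na.contains "--" then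
      some ("git checkout -- can overwrite working tree files (" ++ sig ++ ")")
    else if command == "git" && na.contains "push" && na.any (fun a => a == "--force" || a == "-f") then
      some ("git push --force rewrites remote history (" ++ sig ++ ")")
    else if command == "git" && na.contains "restore" && na.any (fun a => PySem.Str.startswith a "--source") then
      some ("git restore --source can overwrite local files (" ++ sig ++ ")")
    else if command == "npm" && na.contains "publish" then
      some ("npm publish affects a registry outside this machine (" ++ sig ++ ")")
    else if command == "rm" &&
        (let cf := PySem.Str.lower (PySem.Str.join "" (na.filter (fun a => PySem.Str.startswith a "-")));
         PySem.Str.isIn "r" cf && PySem.Str.isIn "f" cf) then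
      if na.any (fun a => a == "/" || a == "/*") || na.contains "--no-preserve-root" then
        some ("rm -rf can cause catastrophic data loss (" ++ sig ++ ")")
      else
        some ("rm -rf can cause catastrophic data loss (" ++ sig ++ ")")
    else if command == "dd" || command == "mkfs" || command == "mkfs.ext4" ||
        command == "mkfs.vfat" || command == "fdisk" || command == "format" then
      some (command ++ " can modify or destroy disk partitions (" ++ sig ++ ")")
    else if command == "chmod" && (na.contains "777" || na.any (fun a => PySem.Str.endswith a "777")) then
      some ("chmod 777 opens permissions to all users (" ++ sig ++ ")")
    else if command == "node" || command == "python" || command == "python3" || command == "pythonw" ||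
        command == "bun" || command == "bash" || command == "sh" || command == "zsh" ||
        command == "fish" || command == "powershell" || command == "pwsh" then
      some (command ++ " can execute arbitrary local code (" ++ sig ++ ")")
    else if command == "diskutil" then
      some ("diskutil can erase or partition disks (" ++ sig ++ ")")
    else if command == "csrutil" then
      some ("csrutil modifies System Integrity Protection (" ++ sig ++ ")")
    else if command == "defaults" && na.contains "write" then
      some ("defaults write modifies system preferences (" ++ sig ++ ")")
    else if command == "launchctl" && na.any (fun a => a == "unload" || a == "bootout" || a == "disable") then
      some ("launchctl can disable system services (" ++ sig ++ ")")
    else if command == "dscl" then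
      some ("dscl can modify directory services and user accounts (" ++ sig ++ ")")
    else
      none) =
    (match pvRules.find? (fun r => r.1.contains command && r.2.1.all (pvAtomHolds na)) with
    | some r => some ((if r.2.2.1 then command ++ r.2.2.2 else r.2.2.2) ++ " (" ++ sig ++ ")")
    | none => none) := by
  by_cases h0 : command = "git"
  · subst h0
    simp only [pvRules, List.find?, pvAtomHolds, List.all_cons, List.all_nil, Bool.and_true,
      List.contains_cons, List.contains_nil, beq_self_eq_true, Bool.true_and, Bool.or_false,
      String.reduceBEq, Bool.false_and]
    cases hb1 : na.contains "reset" && na.contains "--hard" with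
    | true => simp
    | false =>
    cases hb2 : na.contains "clean" with
    | true => simp
    | false =>
    cases hb3 : na.contains "checkout" && na.contains "--" with
    | true => simp
    | false =>
    cases hb4 : na.contains "push" && na.any (fun a => a == "--force" || a == "-f") with
    | true => simp
    | false =>
    cases hb5 : na.contains "restore" && na.any (fun a => PySem.Str.startswith a "--source") with
    | true => simp
    | false => simp
  by_cases h1 : command = "npm"
  · subst h1
    simp only [pvRules, List.find?, pvAtomHolds, List.all_cons, List.all_nil, Bool.and_true,
      List.contains_cons, List.contains_nil, beq_self_eq_true, Bool.true_and, Bool.or_false,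
      String.reduceBEq, Bool.false_and]
    cases hb : na.contains "publish" with
    | true => simp
    | false => simp
  by_cases h2 : command = "rm"
  · subst h2
    simp only [pvRules, List.find?, pvAtomHolds, List.all_cons, List.all_nil, Bool.and_true,
      List.contains_cons, List.contains_nil, beq_self_eq_true, Bool.true_and, Bool.or_false,
      String.reduceBEq, Bool.false_and]
    cases hb : PySem.Str.isIn "r" (PySem.Str.lower (PySem.Str.join "" (na.filter (fun a => PySem.Str.startswith a "-")))) &&
        PySem.Str.isIn "f" (PySem.Str.lower (PySem.Str.join "" (na.filter (fun a => PySem.Str.startswith a "-")))) with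
    | true => simp [ite_self]
    | false => simp
  by_cases h3 : command = "dd"
  · subst h3; simp [pvRules, List.find?, pvAtomHolds]
  by_cases h4 : command = "mkfs"
  · subst h4; simp [pvRules, List.find?, pvAtomHolds]
  by_cases h5 : command = "mkfs.ext4"
  · subst h5; simp [pvRules, List.find?, pvAtomHolds]
  by_cases h6 : command = "mkfs.vfat"
  · subst h6; simp [pvRules, List.find?, pvAtomHolds]
  by_cases h7 : command = "fdisk"
  · subst h7; simp [pvRules, List.find?, pvAtomHolds]
  by_cases h8 : command = "format"
  · subst h8; simp [pvRules, List.find?, pvAtomHolds]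
  by_cases h9 : command = "chmod"
  · subst h9
    simp only [pvRules, List.find?, pvAtomHolds, List.all_cons, List.all_nil, Bool.and_true,
      List.contains_cons, List.contains_nil, beq_self_eq_true, Bool.true_and, Bool.or_false,
      String.reduceBEq, Bool.false_and]
    cases hb : na.any (fun a => PySem.Str.endswith a "777") with
    | true => simp
    | false =>
      have hc : na.contains "777" = false := by
        cases hcc : na.contains "777" with
        | false => rfl
        | true => exact absurd (pv_contains_777_endswith na hcc) (by rw [hb]; simp)
      have hc' : "777" ∉ na := by simpa using hc
      simp [hc']
  by_cases h10 : command = "node"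
  · subst h10; simp [pvRules, List.find?, pvAtomHolds]
  by_cases h11 : command = "python"
  · subst h11; simp [pvRules, List.find?, pvAtomHolds]
  by_cases h12 : command = "python3"
  · subst h12; simp [pvRules, List.find?, pvAtomHolds]
  by_cases h13 : command = "pythonw"
  · subst h13; simp [pvRules, List.find?, pvAtomHolds]
  by_cases h14 : command = "bun"
  · subst h14; simp [pvRules, List.find?, pvAtomHolds]
  by_cases h15 : command = "bash"
  · subst h15; simp [pvRules, List.find?, pvAtomHolds]
  by_cases h16 : command = "sh"
  · subst h16; simp [pvRules, List.find?, pvAtomHolds]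
  by_cases h17 : command = "zsh"
  · subst h17; simp [pvRules, List.find?, pvAtomHolds]
  by_cases h18 : command = "fish"
  · subst h18; simp [pvRules, List.find?, pvAtomHolds]
  by_cases h19 : command = "powershell"
  · subst h19; simp [pvRules, List.find?, pvAtomHolds]
  by_cases h20 : command = "pwsh"
  · subst h20; simp [pvRules, List.find?, pvAtomHolds]
  by_cases h21 : command = "diskutil"
  · subst h21; simp [pvRules, List.find?, pvAtomHolds]
  by_cases h22 : command = "csrutil"
  · subst h22; simp [pvRules, List.find?, pvAtomHolds]
  by_cases h23 : command = "defaults"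
  · subst h23
    simp only [pvRules, List.find?, pvAtomHolds, List.all_cons, List.all_nil, Bool.and_true,
      List.contains_cons, List.contains_nil, beq_self_eq_true, Bool.true_and, Bool.or_false,
      String.reduceBEq, Bool.false_and]
    cases hb : na.contains "write" with
    | true => simp
    | false => simp
  by_cases h24 : command = "launchctl"
  · subst h24
    simp only [pvRules, List.find?, pvAtomHolds, List.all_cons, List.all_nil, Bool.and_true,
      List.contains_cons, List.contains_nil, beq_self_eq_true, Bool.true_and, Bool.or_false,
      String.reduceBEq, Bool.false_and, Bool.or_assoc]
    cases hb : na.any (fun a => a == "unload" || (a == "bootout" || a == "disable")) with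
    | true => simp
    | false => simp
  by_cases h25 : command = "dscl"
  · subst h25; simp [pvRules, List.find?, pvAtomHolds]
  · simp [pvRules, List.find?, beq_iff_eq, h0, h1, h2,
      h3, h4, h5, h6, h7,
      h8, h9, h10, h11, h12,
      h13, h14, h15, h16, h17,
      h18, h19, h20, h21, h22,
      h23, h24, h25]

theorem classify_dangerous_command_py_eq_alt (command : String) (args : List String) :
    classify_dangerous_command_py command args = classify_dangerous_command_py_alt command args :=
  pv_chain_eq_table command ((args.map PySem.Str.strip).filter (fun s => !(s == "")))
    (PySem.Str.strip (PySem.Str.join " "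
      (command :: (args.map PySem.Str.strip).filter (fun s => !(s == "")))))

-- ===== VERDICT (by name: the statement is the Claim_ definition above) =====
theorem classify_dangerous_command_py_spec : Claim_equal_classify_dangerous_command_py := by
  intro command args _
  unfold Spec_classify_dangerous_command_py
  exact classify_dangerous_command_py_eq_alt command args
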